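-- pv_equiv track=rewrite | github.com/MedouLoq/DGC-invoices | test.py | generate_amount_in_words
-- ===== SOURCE A (Python) =====
-- def generate_amount_in_words(amount, currency):
--     if amount == 0:
--         return f"Zero {currency}"
--
--     ones = ['', 'One', 'Two', 'Three', 'Four', 'Five', 'Six', 'Seven', 'Eight', 'Nine']
--     teens = ['Ten', 'Eleven', 'Twelve', 'Thirteen', 'Fourteen', 'Fifteen',
--              'Sixteen', 'Seventeen', 'Eighteen', 'Nineteen']
--     tens = ['', '', 'Twenty', 'Thirty', 'Forty', 'Fifty', 'Sixty', 'Seventy', 'Eighty', 'Ninety']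
--     thousands = ['', 'Thousand', 'Million', 'Billion']
--
--     def convert_below_thousand(n):
--         if n == 0:
--             return ''
--         elif n < 10:
--             return ones[n]
--         elif n < 20:
--             return teens[n - 10]
--         elif n < 100:
--             return tens[n // 10] + (' ' + ones[n % 10] if n % 10 != 0 else '')
--         else:
--             return ones[n // 100] + ' Hundred' + (' ' + convert_below_thousand(n % 100) if n % 100 != 0 else '')
--
--     # FIXED chunking logic
--     num_str = str(amount)[::-1]
--     chunks = [num_str[i:i+3][::-1] for i in range(0, len(num_str), 3)]
--
--     result = []
--     for i, chunk in enumerate(chunks):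
--         num = int(chunk)
--         if num != 0:
--             result.append(convert_below_thousand(num) + ' ' + thousands[i])
--
--     words = ' '.join(reversed(result)).strip()
--     return f"{words} {currency} ({amount} {currency}) excluding VAT"
-- ===== SOURCE B (Python) =====
-- def generate_amount_in_words(amount, currency):
--     if amount == 0:
--         return f"Zero {currency}"
--
--     ones = ['', 'One', 'Two', 'Three', 'Four', 'Five', 'Six', 'Seven', 'Eight', 'Nine']
--     teens = ['Ten', 'Eleven', 'Twelve', 'Thirteen', 'Fourteen', 'Fifteen',
--              'Sixteen', 'Seventeen', 'Eighteen', 'Nineteen']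
--     tens = ['', '', 'Twenty', 'Thirty', 'Forty', 'Fifty', 'Sixty', 'Seventy', 'Eighty', 'Ninety']
--     thousands = ['', 'Thousand', 'Million', 'Billion']
--
--     def words_999(n):
--         w = []
--         h, r = divmod(n, 100)
--         if h:
--             w.append(ones[h] + ' Hundred')
--         if 10 <= r < 20:
--             w.append(teens[r - 10])
--         else:
--             t, o = divmod(r, 10)
--             if t:
--                 w.append(tens[t])
--             if o:
--                 w.append(ones[o])
--         return ' '.join(w)
--
--     # arithmetic grouping: peel base-1000 digits off the number itself
--     parts = []
--     n, i = amount, 0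
--     while n > 0:
--         n, rem = divmod(n, 1000)
--         if rem:
--             parts.insert(0, words_999(rem) + ' ' + thousands[i])
--         i += 1
--
--     words = ' '.join(parts).strip()
--     return f"{words} {currency} ({amount} {currency}) excluding VAT"
-- ===== Notes on version B (the rewrite author's own statement) =====
-- stated objective: alternative
-- what changed: B extracts the base-1000 groups by repeated divmod on the number itself instead of reversing and slicing str(amount), and renders each below-1000 group as a join of word parts built with divmod instead of A's recursive string concatenation.
-- outside the precondition, e.g. on generate_amount_in_words(-5, 'MAD'): A returns 'Five MAD (-5 MAD) excluding VAT', B returns ' MAD (-5 MAD) excluding VAT'; on generate_amount_in_words(-100, 'MAD'): A raises ValueError, B returns ' MAD (-100 MAD) excluding VAT'; on generate_amount_in_words(-15, 'MAD'): A raises IndexError, B returns ' MAD (-15 MAD) excluding VAT'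
import Mathlib
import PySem

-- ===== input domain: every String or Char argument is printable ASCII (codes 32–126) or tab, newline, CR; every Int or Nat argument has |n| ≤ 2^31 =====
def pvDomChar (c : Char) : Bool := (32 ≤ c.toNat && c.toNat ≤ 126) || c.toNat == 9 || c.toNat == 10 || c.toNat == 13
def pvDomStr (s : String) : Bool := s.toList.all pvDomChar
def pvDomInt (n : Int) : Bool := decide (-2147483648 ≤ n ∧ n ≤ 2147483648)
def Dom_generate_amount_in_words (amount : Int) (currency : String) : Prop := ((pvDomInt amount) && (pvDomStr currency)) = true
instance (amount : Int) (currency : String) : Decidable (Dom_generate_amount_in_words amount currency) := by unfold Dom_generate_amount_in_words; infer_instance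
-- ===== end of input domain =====

-- B peels base-1000 groups off the number arithmetically (divmod) instead of reversing and
-- slicing the decimal string, and builds each below-1000 phrase as a join of parts instead of
-- A's recursive concatenation; alternative decomposition, same cost.

-- lookup tables (identical data in both Pythons)
def pvOnes : List String :=
  ["", "One", "Two", "Three", "Four", "Five", "Six", "Seven", "Eight", "Nine"]
def pvTeens : List String :=
  ["Ten", "Eleven", "Twelve", "Thirteen", "Fourteen", "Fifteen",
   "Sixteen", "Seventeen", "Eighteen", "Nineteen"]
def pvTens : List String :=
  ["", "", "Twenty", "Thirty", "Forty", "Fifty", "Sixty", "Seventy", "Eighty", "Ninety"]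
def pvThousands : List String := ["", "Thousand", "Million", "Billion"]

-- Python list indexing xs[i] (negative wraparound exact); IndexError (none) is outside Pre_
def pvGetS (xs : List String) (i : Int) : String := (PySem.List.pyGet? xs i).getD ""

-- ===== PORT A =====
-- A's convert_below_thousand, step for step
def convertBelow (n : Int) : String :=
  if _h0 : n = 0 then ""
  else if _h1 : n < 10 then pvGetS pvOnes n
  else if _h2 : n < 20 then pvGetS pvTeens (n - 10)
  else if _h3 : n < 100 then
    pvGetS pvTens (PySem.Int.floordiv n 10) ++
      (if PySem.Int.mod n 10 ≠ 0 then " " ++ pvGetS pvOnes (PySem.Int.mod n 10) else "")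
  else
    pvGetS pvOnes (PySem.Int.floordiv n 100) ++ " Hundred" ++
      (if _h4 : PySem.Int.mod n 100 ≠ 0 then " " ++ convertBelow (PySem.Int.mod n 100) else "")
termination_by n.toNat
decreasing_by
  have h1 : PySem.Int.mod n 100 < 100 := PySem.Int.mod_lt n (by norm_num)
  have h2 : 0 ≤ PySem.Int.mod n 100 := PySem.Int.mod_nonneg n (by norm_num)
  omega

def generate_amount_in_words (amount : Int) (currency : String) : String :=
  if amount = 0 then "Zero " ++ currency
  else
    -- num_str = str(amount)[::-1]   ([::-1] is reverse: PySem.List.slice?_none_none_neg_one)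
    let num_str : List Char := (PySem.Int.toChars amount).reverse
    -- chunks = [num_str[i:i+3][::-1] for i in range(0, len(num_str), 3)]
    let chunks : List (List Char) :=
      (PySem.List.pyRange 0 (num_str.length : Int) 3).map
        (fun i => (PySem.List.slice num_str (some i) (some (i + 3))).reverse)
    -- for i, chunk in enumerate(chunks): …
    let result : List String :=
      (PySem.List.enumerate chunks 0).foldl
        (fun res p =>
          let num : Int := (PySem.Int.ofChars? p.2).getD 0  -- int(chunk); ValueError only outside Pre_
          if num ≠ 0 then res ++ [convertBelow num ++ " " ++ pvGetS pvThousands p.1] else res)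
        []
    let words := PySem.Str.strip (PySem.Str.join " " result.reverse)
    words ++ " " ++ currency ++ " (" ++ PySem.Int.toStr amount ++ " " ++ currency ++ ") excluding VAT"

-- ===== PORT B =====
-- B's words_999: join of parts obtained by divmod
def wordsNN (n : Int) : String :=
  let h := PySem.Int.floordiv n 100
  let r := PySem.Int.mod n 100
  let w0 : List String := if h ≠ 0 then [pvGetS pvOnes h ++ " Hundred"] else []
  let w : List String :=
    if 10 ≤ r ∧ r < 20 then w0 ++ [pvGetS pvTeens (r - 10)]
    else
      let t := PySem.Int.floordiv r 10
      let o := PySem.Int.mod r 10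
      let w1 := if t ≠ 0 then w0 ++ [pvGetS pvTens t] else w0
      if o ≠ 0 then w1 ++ [pvGetS pvOnes o] else w1
  PySem.Str.join " " w

-- B's while-loop: n, rem = divmod(n, 1000); prepend the phrase while n > 0
def altLoop (n : Int) (i : Int) (parts : List String) : List String :=
  if _h : n ≤ 0 then parts
  else
    altLoop (PySem.Int.floordiv n 1000) (i + 1)
      (if PySem.Int.mod n 1000 ≠ 0 then
        (wordsNN (PySem.Int.mod n 1000) ++ " " ++ pvGetS pvThousands i) :: parts
      else parts)
termination_by n.toNat
decreasing_by
  have h1 : PySem.Int.floordiv n 1000 = n / 1000 := PySem.Int.floordiv_eq_ediv_of_pos (by norm_num)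
  have h2 : n / 1000 < n := by
    rcases lt_or_ge n 1000 with hc | hc
    · have : n / 1000 = 0 := by omega
      omega
    · exact (Int.ediv_lt_iff_lt_mul (by norm_num)).mpr (by nlinarith)
  have h3 : 0 ≤ n / 1000 := Int.ediv_nonneg (by omega) (by norm_num)
  omega

def generate_amount_in_words_alt (amount : Int) (currency : String) : String :=
  if amount = 0 then "Zero " ++ currency
  else
    let parts := altLoop amount 0 []
    let words := PySem.Str.strip (PySem.Str.join " " parts)
    words ++ " " ++ currency ++ " (" ++ PySem.Int.toStr amount ++ " " ++ currency ++ ") excluding VAT"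

-- ===== PRECONDITION & SPEC =====
-- Pre_ excludes negative amounts: there A raises ValueError/IndexError for most magnitudes and on
-- the remaining ones returns words garbled by Python's negative list indexing (an artefact of
-- slicing str(amount) with its '-' sign); B simply produces no words for a negative amount.
def Pre_generate_amount_in_words (amount : Int) (currency : String) : Prop := 0 ≤ amount
instance (amount : Int) (currency : String) : Decidable (Pre_generate_amount_in_words amount currency) := by
  unfold Pre_generate_amount_in_words; infer_instance

def pvWitness_generate_amount_in_words : Int × String := (1000005, "MAD")

def Spec_generate_amount_in_words (amount : Int) (currency : String) (out : String) : Prop :=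
  out = generate_amount_in_words_alt amount currency
instance (amount : Int) (currency : String) (out : String) : Decidable (Spec_generate_amount_in_words amount currency out) := by
  unfold Spec_generate_amount_in_words; infer_instance

-- ===== CLAIM (what is proved, stated in full; the proofs are below) =====
def Claim_equal_generate_amount_in_words : Prop :=
  ∀ (amount : Int) (currency : String), Dom_generate_amount_in_words amount currency →
    Pre_generate_amount_in_words amount currency →
    Spec_generate_amount_in_words amount currency (generate_amount_in_words amount currency)

-- ===== LEMMAS AND PROOFS =====

-- the decimal digit characters of a positive number, via Nat.toDigitsCore
lemma pv_toDigitsCore_eq (fuel : Nat) : ∀ (n : Nat) (acc : List Char), n ≠ 0 → n < 10 ^ fuel →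
    Nat.toDigitsCore 10 fuel n acc = ((Nat.digits 10 n).map Nat.digitChar).reverse ++ acc := by
  induction fuel with
  | zero => intro n acc h0 h; omega
  | succ fuel ih =>
    intro n acc h0 h
    rw [show Nat.toDigitsCore 10 (fuel+1) n acc
        = (if n / 10 = 0 then (n % 10).digitChar :: acc
           else Nat.toDigitsCore 10 fuel (n / 10) ((n % 10).digitChar :: acc)) from rfl]
    by_cases hq : n / 10 = 0
    · rw [if_pos hq]
      rw [Nat.digits_def' (by norm_num : (1:Nat) < 10) (by omega)]
      have hnil : Nat.digits 10 (n / 10) = [] := by rw [hq]; simp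
      simp [hnil]
    · rw [if_neg hq]
      rw [Nat.digits_def' (by norm_num : (1:Nat) < 10) (by omega : 0 < n)]
      rw [ih (n / 10) _ hq (by
        have : n < 10 ^ fuel * 10 := by rw [← pow_succ]; exact h
        omega)]
      simp

lemma pv_toChars_pos (m : Nat) (hm : m ≠ 0) :
    PySem.Int.toChars (m : Int) = ((Nat.digits 10 m).map Nat.digitChar).reverse := by
  unfold PySem.Int.toChars
  rw [if_neg (by omega)]
  simp only [Int.toNat_natCast]
  unfold Nat.toDigits
  have hlt : m < 10 ^ (m + 1) :=
    lt_of_lt_of_le (Nat.lt_pow_self (by norm_num)) (Nat.pow_le_pow_right (by norm_num) (Nat.le_succ m))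
  exact (pv_toDigitsCore_eq (m+1) m [] hm hlt).trans (by simp)

-- int() of one to three digit characters (checked by computation)
lemma pv_parse_dec :
    ∀ a < 10, (PySem.Int.ofChars? (([a].map Nat.digitChar).reverse) = some ((Nat.ofDigits 10 [a] : Nat) : Int))
      ∧ ∀ b < 10, (PySem.Int.ofChars? (([a,b].map Nat.digitChar).reverse) = some ((Nat.ofDigits 10 [a,b] : Nat) : Int))
        ∧ ∀ c < 10, PySem.Int.ofChars? (([a,b,c].map Nat.digitChar).reverse) = some ((Nat.ofDigits 10 [a,b,c] : Nat) : Int) := by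
  decide

lemma pv_parse_le3 (l : List Nat) (h1 : l ≠ []) (h2 : l.length ≤ 3) (h3 : ∀ d ∈ l, d < 10) :
    PySem.Int.ofChars? ((l.map Nat.digitChar).reverse) = some ((Nat.ofDigits 10 l : Nat) : Int) := by
  rcases l with _ | ⟨a, _ | ⟨b, _ | ⟨c, _ | ⟨d, t⟩⟩⟩⟩
  · exact absurd rfl h1
  · exact (pv_parse_dec a (h3 a (by simp))).1
  · exact ((pv_parse_dec a (h3 a (by simp))).2 b (h3 b (by simp))).1
  · exact ((pv_parse_dec a (h3 a (by simp))).2 b (h3 b (by simp))).2 c (h3 c (by simp))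
  · simp at h2; omega

-- String-level forms of the PySem.Chars.join lemmas
lemma pv_join_nil : PySem.Str.join " " [] = "" := rfl

lemma pv_join_singleton (a : String) : PySem.Str.join " " [a] = a := by
  simp [PySem.Str.join, PySem.Chars.join_singleton]

lemma pv_join_cons_cons (a b : String) (t : List String) :
    PySem.Str.join " " (a :: b :: t) = a ++ " " ++ PySem.Str.join " " (b :: t) := by
  unfold PySem.Str.join
  rw [List.map_cons, List.map_cons, PySem.Chars.join_cons_cons, String.ofList_append,
    String.ofList_append, String.ofList_toList]
  rfl

-- word lists behind both below-1000 renderings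
def tailWords (r : Nat) : List String :=
  if 10 ≤ r ∧ r < 20 then [pvGetS pvTeens ((r : Int) - 10)]
  else
    (if r / 10 ≠ 0 then [pvGetS pvTens ((r / 10 : Nat) : Int)] else []) ++
    (if r % 10 ≠ 0 then [pvGetS pvOnes ((r % 10 : Nat) : Int)] else [])

def headWords (v : Nat) : List String :=
  if v / 100 ≠ 0 then [pvGetS pvOnes ((v / 100 : Nat) : Int) ++ " Hundred"] else []

lemma pv_mod10 (a : Nat) : PySem.Int.mod (a : Int) 10 = ((a % 10 : Nat) : Int) := by
  rw [PySem.Int.mod_eq_emod_of_pos (by norm_num)]; omega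

lemma pv_fd10 (a : Nat) : PySem.Int.floordiv (a : Int) 10 = ((a / 10 : Nat) : Int) := by
  rw [PySem.Int.floordiv_eq_ediv_of_pos (by norm_num)]; omega

lemma pv_mod100 (a : Nat) : PySem.Int.mod (a : Int) 100 = ((a % 100 : Nat) : Int) := by
  rw [PySem.Int.mod_eq_emod_of_pos (by norm_num)]; omega

lemma pv_fd100 (a : Nat) : PySem.Int.floordiv (a : Int) 100 = ((a / 100 : Nat) : Int) := by
  rw [PySem.Int.floordiv_eq_ediv_of_pos (by norm_num)]; omega

lemma pv_conv_tail (r : Nat) (hr : r < 100) :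
    convertBelow (r : Int) = PySem.Str.join " " (tailWords r) := by
  rw [convertBelow]
  unfold tailWords
  by_cases h0 : r = 0
  · subst h0
    norm_num [pv_join_nil]
  · rw [dif_neg (by exact_mod_cast h0 : ¬((r : Int) = 0))]
    by_cases h10 : r < 10
    · rw [dif_pos (by exact_mod_cast h10 : (r : Int) < 10)]
      rw [if_neg (by omega : ¬(10 ≤ r ∧ r < 20)), if_neg (by omega : ¬¬(r / 10 = 0)),
        if_pos (by omega : ¬(r % 10 = 0))]
      rw [Nat.mod_eq_of_lt h10]
      rw [List.nil_append, pv_join_singleton]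
    · by_cases h20 : r < 20
      · rw [dif_neg (by exact_mod_cast h10 : ¬((r : Int) < 10)),
          dif_pos (by exact_mod_cast h20 : (r : Int) < 20)]
        rw [if_pos (by omega : 10 ≤ r ∧ r < 20), pv_join_singleton]
      · rw [dif_neg (by exact_mod_cast h10 : ¬((r : Int) < 10)),
          dif_neg (by exact_mod_cast h20 : ¬((r : Int) < 20)),
          dif_pos (by exact_mod_cast hr : (r : Int) < 100)]
        rw [if_neg (by omega : ¬(10 ≤ r ∧ r < 20)), if_pos (by omega : ¬(r / 10 = 0))]
        rw [pv_fd10 r, pv_mod10 r]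
        by_cases ho : r % 10 = 0
        · rw [if_neg (by simp [ho] : ¬(((r % 10 : Nat) : Int) ≠ 0)),
            if_neg (by omega : ¬¬(r % 10 = 0))]
          rw [List.append_nil, pv_join_singleton]
          simp
        · rw [if_pos (by exact_mod_cast ho : ((r % 10 : Nat) : Int) ≠ 0),
            if_pos (by omega : ¬(r % 10 = 0))]
          simp only [List.singleton_append]
          rw [pv_join_cons_cons, pv_join_singleton, String.append_assoc]

lemma pv_tailWords_ne_nil (r : Nat) (h0 : r ≠ 0) (hr : r < 100) : tailWords r ≠ [] := by
  unfold tailWords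
  by_cases h : 10 ≤ r ∧ r < 20
  · simp [h]
  · rw [if_neg h]
    by_cases ht : r / 10 = 0
    · have hm : r % 10 = r := Nat.mod_eq_of_lt (by omega)
      simp [ht, hm, h0]
    · simp [ht]

lemma pv_wordsNN_eq (v : Nat) :
    wordsNN (v : Int) = PySem.Str.join " " (headWords v ++ tailWords (v % 100)) := by
  unfold wordsNN headWords tailWords
  dsimp only
  rw [pv_fd100 v, pv_mod100 v, pv_fd10 (v % 100), pv_mod10 (v % 100)]
  simp only [ne_eq, Nat.cast_eq_zero, Nat.ofNat_le_cast, Nat.cast_lt_ofNat]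
  split_ifs <;> simp

-- A's convert_below_thousand agrees with B's words_999 on 0 … 999
lemma pv_conv_eq (v : Nat) (hv : v < 1000) : convertBelow (v : Int) = wordsNN (v : Int) := by
  rw [pv_wordsNN_eq v]
  by_cases hv100 : v < 100
  · have hh : v / 100 = 0 := by omega
    have hm : v % 100 = v := Nat.mod_eq_of_lt hv100
    rw [pv_conv_tail v hv100, hm]
    unfold headWords
    rw [if_neg (by omega : ¬¬(v / 100 = 0)), List.nil_append]
  · rw [convertBelow]
    have c1 : ¬((v : Int) = 0) := by exact_mod_cast (by omega : ¬ v = 0)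
    have c2 : ¬((v : Int) < 10) := by exact_mod_cast (by omega : ¬ v < 10)
    have c3 : ¬((v : Int) < 20) := by exact_mod_cast (by omega : ¬ v < 20)
    have c4 : ¬((v : Int) < 100) := by exact_mod_cast hv100
    rw [dif_neg c1, dif_neg c2, dif_neg c3, dif_neg c4]
    rw [pv_fd100 v, pv_mod100 v]
    unfold headWords
    rw [if_pos (by omega : ¬(v / 100 = 0)), List.singleton_append]
    by_cases hr : v % 100 = 0
    · have ht0 : tailWords (v % 100) = [] := by
        rw [hr]; unfold tailWords; norm_num
      rw [ht0, pv_join_singleton, dif_neg (by simp [hr] : ¬(((v % 100 : Nat) : Int) ≠ 0))]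
      simp
    · obtain ⟨b, bs, hbs⟩ := List.exists_cons_of_ne_nil
        (pv_tailWords_ne_nil (v % 100) hr (Nat.mod_lt v (by norm_num)))
      rw [dif_pos (by exact_mod_cast hr : ((v % 100 : Nat) : Int) ≠ 0)]
      rw [pv_conv_tail (v % 100) (Nat.mod_lt v (by norm_num)), hbs, pv_join_cons_cons]
      simp only [String.append_assoc]

-- groups of three, little-endian (proof-side view of both chunkings)
def groups3 {α : Type} (l : List α) : List (List α) :=
  match l with
  | [] => []
  | x :: xs => ((x :: xs).take 3) :: groups3 ((x :: xs).drop 3)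
termination_by l.length

lemma pv_groups3_props {α : Type} (l : List α) :
    ∀ g ∈ groups3 l, g ≠ [] ∧ g.length ≤ 3 ∧ ∀ d ∈ g, d ∈ l := by
  induction l using groups3.induct with
  | case1 => intro g hg; simp [groups3] at hg
  | case2 x xs ih =>
    intro g hg
    rw [groups3] at hg
    rcases List.mem_cons.mp hg with h | h
    · subst h
      refine ⟨by simp, by simp, ?_⟩
      intro d hd; exact List.mem_of_mem_take hd
    · obtain ⟨h1, h2, h3⟩ := ih g h
      exact ⟨h1, h2, fun d hd => List.mem_of_mem_drop (h3 d hd)⟩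

lemma pv_groups3_map {α β : Type} (f : α → β) (l : List α) :
    groups3 (l.map f) = (groups3 l).map (List.map f) := by
  induction l using groups3.induct with
  | case1 => simp [groups3]
  | case2 x xs ih =>
    have h : (x :: xs).map f = f x :: xs.map f := rfl
    simp only [h, groups3, List.map_cons]
    rw [← h, ← List.map_take, ← List.map_drop, ih]

lemma pv_range_chunks {α : Type} (l : List α) :
    (List.range ((l.length + 2) / 3)).map (fun k => ((l.drop (3*k)).take 3).reverse)
      = (groups3 l).map List.reverse := by
  induction l using groups3.induct with
  | case1 => simp [groups3]
  | case2 x xs ih =>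
    have hlen : ((x :: xs).length + 2) / 3 = (((x :: xs).drop 3).length + 2) / 3 + 1 := by
      simp only [List.length_cons, List.length_drop]
      omega
    rw [hlen, List.range_succ_eq_map, List.map_cons, List.map_map]
    rw [groups3, List.map_cons]
    refine congrArg₂ List.cons (by simp) ?_
    refine Eq.trans ?_ ih
    apply List.map_congr_left
    intro k _
    simp only [Function.comp_apply]
    have e1 : 3 * Nat.succ k = 3 * k + 2 + 1 := by omega
    rw [e1]
    rw [show List.drop (3 * k + 2 + 1) (x :: xs) = List.drop (3 * k + 2) xs from rfl]
    rw [List.drop_drop]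
    rw [show (3 + 3 * k) = 3 * k + 2 + 1 from by omega,
      show List.drop (3 * k + 2 + 1) (x :: xs) = List.drop (3 * k + 2) xs from rfl]

-- A's slice comprehension is the reversed groups of three
lemma pv_chunks_eq_groups3 {α : Type} (l : List α) :
    (PySem.List.pyRange 0 (l.length : Int) 3).map
        (fun i => (PySem.List.slice l (some i) (some (i + 3))).reverse)
      = (groups3 l).map List.reverse := by
  rw [PySem.List.pyRange_of_pos 0 (l.length : Int) (by norm_num)]
  rcases List.eq_nil_or_concat l with hnil | _
  · subst hnil; simp [groups3]
  · have hne : l.length ≠ 0 := by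
      rcases l with _ | _
      · simp_all
      · simp
    rw [if_pos (by exact_mod_cast Nat.pos_of_ne_zero hne : (0:Int) < (l.length : Int))]
    have hcnt : (((l.length : Int) - 0 + 3 - 1) / 3).toNat = (l.length + 2) / 3 := by omega
    rw [hcnt, List.map_map, ← pv_range_chunks l]
    apply List.map_congr_left
    intro k _
    simp only [Function.comp_apply, zero_add]
    have h3k : (3 : Int) * (k : Int) = ((3 * k : Nat) : Int) := by push_cast; ring
    rw [h3k, show ((3 * k : Nat) : Int) + 3 = ((3 * k : Nat) : Int) + ((3 : Nat) : Int) from by norm_num,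
      PySem.List.slice_natCast_add]

-- the common shape both loops reduce to
def goParts (gs : List (List Nat)) (i : Int) (acc : List String) : List String :=
  match gs with
  | [] => acc
  | g :: t =>
      goParts t (i + 1)
        (if (Nat.ofDigits 10 g : Nat) ≠ 0 then
          (wordsNN ((Nat.ofDigits 10 g : Nat) : Int) ++ " " ++ pvGetS pvThousands i) :: acc
        else acc)

-- A's fold over the enumerated chunks, reversed, is goParts
lemma pv_fold_eq_goParts (gs : List (List Nat)) :
    ∀ (i : Int) (acc : List String), (∀ g ∈ gs, g.length ≤ 3 ∧ g ≠ [] ∧ ∀ d ∈ g, d < 10) →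
    ((PySem.List.enumerate (gs.map (fun g => (g.map Nat.digitChar).reverse)) i).foldl
        (fun res p =>
          let num : Int := (PySem.Int.ofChars? p.2).getD 0
          if num ≠ 0 then res ++ [convertBelow num ++ " " ++ pvGetS pvThousands p.1] else res)
        acc).reverse
      = goParts gs i acc.reverse := by
  induction gs with
  | nil =>
    intro i acc _
    simp [goParts]
  | cons g t ih =>
    intro i acc hp
    obtain ⟨hle, hne, hlt⟩ := hp g (by simp)
    have hprops : ∀ g' ∈ t, g'.length ≤ 3 ∧ g' ≠ [] ∧ ∀ d ∈ g', d < 10 :=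
      fun g' hg' => hp g' (by simp [hg'])
    have hparse := pv_parse_le3 g hne hle hlt
    have hbound : Nat.ofDigits 10 g < 1000 :=
      lt_of_lt_of_le (Nat.ofDigits_lt_base_pow_length (by norm_num) hlt)
        (Nat.pow_le_pow_right (by norm_num) hle)
    rw [List.map_cons, PySem.List.enumerate_cons, List.foldl_cons]
    dsimp only
    rw [hparse, Option.getD_some]
    rw [goParts]
    by_cases hz : (Nat.ofDigits 10 g : Nat) = 0
    · rw [if_neg (by simp [hz] : ¬(((Nat.ofDigits 10 g : Nat) : Int) ≠ 0)),
        if_neg (by omega : ¬((Nat.ofDigits 10 g : Nat) ≠ 0))]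
      exact ih (i + 1) acc hprops
    · rw [if_pos (by exact_mod_cast hz : ((Nat.ofDigits 10 g : Nat) : Int) ≠ 0), if_pos hz]
      rw [ih (i + 1) _ hprops]
      rw [pv_conv_eq _ hbound]
      congr 1
      simp

lemma pv_digits_div10 (m : Nat) : Nat.digits 10 (m / 10) = (Nat.digits 10 m).tail := by
  rcases Nat.eq_zero_or_pos m with h | h
  · subst h; simp
  · rw [Nat.digits_def' (by norm_num : (1:Nat) < 10) h]; rfl

lemma pv_digits_div1000 (m : Nat) : Nat.digits 10 (m / 1000) = (Nat.digits 10 m).drop 3 := by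
  have h : m / 1000 = m / 10 / 10 / 10 := by omega
  rw [h, pv_digits_div10, pv_digits_div10, pv_digits_div10]
  rw [← List.drop_one, ← List.drop_one, ← List.drop_one, List.drop_drop, List.drop_drop]

-- B's loop is goParts
lemma pv_fd1000 (a : Nat) : PySem.Int.floordiv (a : Int) 1000 = ((a / 1000 : Nat) : Int) := by
  rw [PySem.Int.floordiv_eq_ediv_of_pos (by norm_num)]; omega

lemma pv_mod1000 (a : Nat) : PySem.Int.mod (a : Int) 1000 = ((a % 1000 : Nat) : Int) := by
  rw [PySem.Int.mod_eq_emod_of_pos (by norm_num)]; omega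

lemma pv_altLoop_eq_goParts (m : Nat) : ∀ (i : Int) (acc : List String),
    altLoop (m : Int) i acc = goParts (groups3 (Nat.digits 10 m)) i acc := by
  induction m using Nat.strong_induction_on with
  | _ m ih =>
    intro i acc
    rw [altLoop]
    by_cases hm : m = 0
    · subst hm
      rw [dif_pos (by norm_num : ((0:Nat) : Int) ≤ 0)]
      simp [groups3, goParts]
    · rw [dif_neg (by exact_mod_cast (by omega : ¬ m ≤ 0) : ¬((m : Int) ≤ 0))]
      rw [pv_fd1000 m, pv_mod1000 m]
      rw [ih (m / 1000) (Nat.div_lt_self (by omega) (by norm_num)) (i + 1)]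
      obtain ⟨d, ds, hds⟩ := List.exists_cons_of_ne_nil
        (Nat.digits_ne_nil_iff_ne_zero.mpr hm)
      rw [pv_digits_div1000 m, hds, groups3]
      rw [show goParts ((d :: ds).take 3 :: groups3 ((d :: ds).drop 3)) i acc
          = goParts (groups3 ((d :: ds).drop 3)) (i + 1)
              (if (Nat.ofDigits 10 ((d :: ds).take 3) : Nat) ≠ 0 then
                (wordsNN ((Nat.ofDigits 10 ((d :: ds).take 3) : Nat) : Int) ++ " " ++
                  pvGetS pvThousands i) :: acc
              else acc) from rfl]
      have hval : (Nat.ofDigits 10 ((d :: ds).take 3) : Nat) = m % 1000 := by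
        rw [← hds, ← Nat.self_mod_pow_eq_ofDigits_take 3 m (by norm_num)]
        norm_num
      rw [hval]
      congr 1
      by_cases hr : m % 1000 = 0
      · rw [if_neg (by simp [hr] : ¬(((m % 1000 : Nat) : Int) ≠ 0)), if_neg (by omega : ¬(m % 1000 ≠ 0))]
      · rw [if_pos (by exact_mod_cast hr : ((m % 1000 : Nat) : Int) ≠ 0), if_pos hr]

-- ===== VERDICT (by name: the statement is the Claim_ definition above) =====
theorem generate_amount_in_words_spec : Claim_equal_generate_amount_in_words := by
  intro amount currency _ hpre
  unfold Spec_generate_amount_in_words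
  unfold generate_amount_in_words generate_amount_in_words_alt
  by_cases h0 : amount = 0
  · rw [if_pos h0, if_pos h0]
  · rw [if_neg h0, if_neg h0]
    dsimp only
    have hm : amount = ((amount.toNat : Nat) : Int) := (Int.toNat_of_nonneg hpre).symm
    set m := amount.toNat with hmdef
    have hmne : m ≠ 0 := by
      intro h
      exact h0 (by rw [hm, h]; rfl)
    rw [hm, pv_toChars_pos m hmne, List.reverse_reverse]
    rw [pv_chunks_eq_groups3 ((Nat.digits 10 m).map Nat.digitChar)]
    rw [pv_groups3_map Nat.digitChar (Nat.digits 10 m), List.map_map]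
    rw [show (List.reverse ∘ List.map Nat.digitChar)
        = (fun (g : List Nat) => (List.map Nat.digitChar g).reverse) from rfl]
    have hprops : ∀ g ∈ groups3 (Nat.digits 10 m), g.length ≤ 3 ∧ g ≠ [] ∧ ∀ d ∈ g, d < 10 := by
      intro g hg
      obtain ⟨h1, h2, h3⟩ := pv_groups3_props (Nat.digits 10 m) g hg
      exact ⟨h2, h1, fun d hd => Nat.digits_lt_base (by norm_num) (h3 d hd)⟩
    rw [pv_fold_eq_goParts (groups3 (Nat.digits 10 m)) 0 [] hprops]
    rw [pv_altLoop_eq_goParts m 0 [], List.reverse_nil]
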